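-- pv_equiv track=rewrite | github.com/yehonatanmizrachi/video-loop-detector | utils.py | has_looped_item
-- ===== SOURCE A (Python) =====
-- import math
--
-- def has_looped_item(input_list: list, loop_min_size: int, min_occurrences: int, margin_error: int) -> bool:
--     for tested_item in input_list:
--         item_indices = [index for index, item in enumerate(input_list) if item == tested_item]
--
--         if len(item_indices) < min_occurrences:
--             continue
--
--         differences = [item_indices[i + 1] - item_indices[i] for i in range(len(item_indices) - 1)]
--         if not all(difference > loop_min_size for difference in differences):
--             continue
--
--         if all(math.fabs(differences[0] - difference) < margin_error for difference in differences):
--             return True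
--
--     return False
-- ===== SOURCE B (Python) =====
-- def has_looped_item(input_list: list, loop_min_size: int, min_occurrences: int, margin_error: int) -> bool:
--     # One pass: group all indices by value, then check each distinct value's gaps.
--     positions = {}
--     for index, item in enumerate(input_list):
--         positions.setdefault(item, []).append(index)
--
--     for indices in positions.values():
--         if len(indices) < min_occurrences:
--             continue
--         gaps = [j - i for i, j in zip(indices, indices[1:])]
--         if all(g > loop_min_size for g in gaps) and all(abs(gaps[0] - g) < margin_error for g in gaps):
--             return True
--
--     return False
-- ===== Notes on version B (the rewrite author's own statement) =====
-- stated objective: faster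
-- what changed: Instead of re-scanning the whole list for every element (including duplicates) to collect its indices, B builds a value->indices dictionary in one pass and checks the gap conditions once per distinct value.
import Mathlib
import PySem

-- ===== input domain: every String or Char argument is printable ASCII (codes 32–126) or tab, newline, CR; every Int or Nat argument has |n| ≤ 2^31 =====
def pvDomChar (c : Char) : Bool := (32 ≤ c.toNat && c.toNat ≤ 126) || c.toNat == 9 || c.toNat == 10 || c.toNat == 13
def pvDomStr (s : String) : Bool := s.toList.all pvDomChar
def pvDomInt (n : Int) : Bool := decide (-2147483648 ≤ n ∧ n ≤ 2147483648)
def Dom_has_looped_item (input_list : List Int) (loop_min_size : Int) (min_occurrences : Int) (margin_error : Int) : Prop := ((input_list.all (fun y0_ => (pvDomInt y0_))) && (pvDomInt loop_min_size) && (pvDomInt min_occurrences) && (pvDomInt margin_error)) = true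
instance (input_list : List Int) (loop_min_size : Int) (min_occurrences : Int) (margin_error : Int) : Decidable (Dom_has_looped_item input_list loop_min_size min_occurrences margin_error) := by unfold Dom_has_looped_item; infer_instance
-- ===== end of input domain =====

-- ===== PORT A =====
-- B replaces A's per-element rescans by a single value->indices grouping pass (measured-faster objective; see claim).
-- Port A: for each tested_item, filter the enumerated list, then check occurrence count,
-- minimum gap size, and gap uniformity; the for-loop with early `return True` is `List.any`.
def has_looped_item (input_list : List Int) (loop_min_size : Int) (min_occurrences : Int) (margin_error : Int) : Bool :=
  input_list.any (fun tested_item =>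
    let item_indices := ((PySem.List.enumerate input_list).filter (fun p => p.2 == tested_item)).map (fun p => p.1)
    if (item_indices.length : Int) < min_occurrences then false
    else
      -- differences = [item_indices[i+1] - item_indices[i] for i in range(len(item_indices) - 1)]
      let differences := (PySem.List.pyRange 0 ((item_indices.length : Int) - 1)).map
        (fun i => PySem.List.pyGetD item_indices (i + 1) 0 - PySem.List.pyGetD item_indices i 0)
      if !(differences.all (fun d => loop_min_size < d)) then false
      else
        -- math.fabs on these ints is exact: |differences[0] - d| as integer absolute value
        differences.all (fun d => |differences.headD 0 - d| < margin_error))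

-- ===== PORT B =====
-- Port B: one grouping pass building positions : value -> list of indices
-- (setdefault(item, []).append(index) = Dict.modify item [] (· ++ [index])),
-- then one check per stored index list; indices[1:] on a list of ints is `.drop 1` (exact).
def pvPositions (xs : List Int) : PySem.Dict Int (List Int) :=
  (PySem.List.enumerate xs).foldl
    (fun d p => d.modify p.2 [] (fun cur => cur ++ [p.1])) PySem.Dict.empty

def has_looped_item_alt (input_list : List Int) (loop_min_size : Int) (min_occurrences : Int) (margin_error : Int) : Bool :=
  (pvPositions input_list).values.any (fun indices =>
    if (indices.length : Int) < min_occurrences then false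
    else
      let gaps := (indices.zip (indices.drop 1)).map (fun q => q.2 - q.1)
      gaps.all (fun g => loop_min_size < g) &&
        gaps.all (fun g => |gaps.headD 0 - g| < margin_error))

-- ===== PRECONDITION & SPEC =====
def Spec_has_looped_item (input_list : List Int) (loop_min_size : Int) (min_occurrences : Int) (margin_error : Int) (out : Bool) : Prop := out = has_looped_item_alt input_list loop_min_size min_occurrences margin_error
instance (input_list : List Int) (loop_min_size : Int) (min_occurrences : Int) (margin_error : Int) (out : Bool) : Decidable (Spec_has_looped_item input_list loop_min_size min_occurrences margin_error out) := by unfold Spec_has_looped_item; infer_instance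

-- ===== CLAIM (what is proved, stated in full; the proofs are below) =====
def Claim_equal_has_looped_item : Prop := ∀ (input_list : List Int) (loop_min_size : Int) (min_occurrences : Int) (margin_error : Int), Dom_has_looped_item input_list loop_min_size min_occurrences margin_error → Spec_has_looped_item input_list loop_min_size min_occurrences margin_error (has_looped_item input_list loop_min_size min_occurrences margin_error)

-- ===== LEMMAS AND PROOFS =====

-- The per-value test both programs apply to a value's index list (B's shape).
def pvCheck (loop_min_size min_occurrences margin_error : Int) (idxs : List Int) : Bool :=
  if (idxs.length : Int) < min_occurrences then false
  else
    let gaps := (idxs.zip (idxs.drop 1)).map (fun q => q.2 - q.1)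
    gaps.all (fun g => loop_min_size < g) &&
      gaps.all (fun g => |gaps.headD 0 - g| < margin_error)

-- The indices of v in xs, as A computes them.
def pvIndices (xs : List Int) (v : Int) : List Int :=
  ((PySem.List.enumerate xs).filter (fun p => p.2 == v)).map (fun p => p.1)

-- A's consecutive-differences loop computes exactly B's zip-with-tail gaps.
theorem pv_gaps_eq (idxs : List Int) :
    (PySem.List.pyRange 0 ((idxs.length : Int) - 1)).map
      (fun i => PySem.List.pyGetD idxs (i + 1) 0 - PySem.List.pyGetD idxs i 0)
    = (idxs.zip (idxs.drop 1)).map (fun q => q.2 - q.1) := by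
  cases idxs with
  | nil => decide
  | cons a t =>
    have h1 : ((a :: t).length : Int) - 1 = ((t.length : Nat) : Int) := by simp
    rw [h1, PySem.List.pyRange_zero_natCast, List.map_map]
    apply List.ext_getElem
    · simp
    · intro i h₁ h₂
      simp only [List.getElem_map, List.getElem_range, Function.comp_apply, List.getElem_zip]
      have hi : i < t.length := by simpa using h₁
      rw [PySem.List.pyGetD_eq_getElem _ _ (by positivity) (by omega),
          PySem.List.pyGetD_eq_getElem _ _ (by positivity) (by omega)]
      have e1 : ((i : Int) + 1).toNat = i + 1 := by omega
      have e2 : ((i : Int)).toNat = i := by omega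
      simp [e1, e2]

theorem pv_if_if_eq_and (c : Prop) [Decidable c] (a b : Bool) :
    (if c then false else if !a then false else b) = (if c then false else (a && b)) := by
  cases a <;> split_ifs <;> simp_all

-- A, rephrased: test pvCheck on the index list of every element.
theorem pv_A_eq (xs : List Int) (lms mo me : Int) :
    has_looped_item xs lms mo me
      = xs.any (fun t => pvCheck lms mo me (pvIndices xs t)) := by
  unfold has_looped_item
  apply PySem.List.any_congr_mem
  intro t _
  simp only [pvCheck, pvIndices, pv_gaps_eq]
  exact pv_if_if_eq_and _ _ _

-- enumerate's second components are the list itself.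
theorem pv_enumerate_map_snd (xs : List Int) (s : Int) :
    (PySem.List.enumerate xs s).map (fun p => p.2) = xs := by
  induction xs generalizing s <;>
    simp_all [PySem.List.enumerate_cons, PySem.List.enumerate_nil]

theorem pv_positions_getD (xs : List Int) (v : Int) :
    (pvPositions xs).getD v [] = pvIndices xs v := by
  unfold pvPositions pvIndices
  rw [show (PySem.List.enumerate xs) =
      ((PySem.List.enumerate xs).map (fun p => (p.2, p.1))).map (fun q => (q.2, q.1)) by
    rw [List.map_map]; simp [Function.comp_def]]
  rw [List.foldl_map, PySem.Dict.getD_foldl_modify_append, List.filter_map]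
  simp [List.map_map, Function.comp_def]

theorem pv_positions_keys (xs : List Int) :
    (pvPositions xs).keys = PySem.Set.ofList xs := by
  unfold pvPositions
  rw [PySem.Dict.keys_foldl_modify_key (PySem.List.enumerate xs) (fun p => p.2) []
        (fun _ p => fun cur => cur ++ [p.1]) PySem.Dict.empty]
  rw [PySem.Dict.keys_empty, pv_enumerate_map_snd, PySem.Set.ofList_eq_foldl]
  rfl

theorem pv_positions_nodup (xs : List Int) : (pvPositions xs).keys.Nodup :=
  PySem.Dict.nodup_keys_foldl_modify_key _ _ _ _ _ PySem.Dict.nodup_keys_empty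

-- B, rephrased: test pvCheck on the stored index list of every distinct value.
theorem pv_B_eq (xs : List Int) (lms mo me : Int) :
    has_looped_item_alt xs lms mo me
      = (PySem.Set.ofList xs).any (fun t => pvCheck lms mo me (pvIndices xs t)) := by
  unfold has_looped_item_alt
  rw [PySem.Dict.values_eq_map_keys (pvPositions xs) (pv_positions_nodup xs) [],
      List.any_map, pv_positions_keys]
  apply PySem.List.any_congr_mem
  intro t _
  simp only [Function.comp_apply, pv_positions_getD, pvCheck]

theorem pv_any_ofList (xs : List Int) (f : Int → Bool) :
    xs.any f = (PySem.Set.ofList xs).any f := by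
  rw [Bool.eq_iff_iff]
  simp only [List.any_eq_true]
  exact ⟨fun ⟨x, hx, hf⟩ => ⟨x, (PySem.Set.mem_ofList xs x).mpr hx, hf⟩,
         fun ⟨x, hx, hf⟩ => ⟨x, (PySem.Set.mem_ofList xs x).mp hx, hf⟩⟩

-- ===== VERDICT (by name: the statement is the Claim_ definition above) =====
theorem has_looped_item_spec : Claim_equal_has_looped_item := by
  intro xs lms mo me _
  unfold Spec_has_looped_item
  rw [pv_A_eq, pv_B_eq, pv_any_ofList]
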